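-- pv_equiv track=rewrite | github.com/pypi-data/pypi-mirror-361 | packages/codecheq/codecheq-0.1.8.tar.gz/codecheq-0.1.8/src/codecheq/patcher.py | _has_proper_indentation
-- ===== SOURCE A (Python) =====
-- def _has_proper_indentation(code: str) -> bool:
--     """Check if the code has proper indentation structure."""
--     lines = code.split('\n')
--
--     # Check if there are any indented lines
--     has_indentation = False
--     for line in lines:
--         if line.strip() and line.startswith(('    ', '\t')):
--             has_indentation = True
--             break
--
--     # If no indentation at all, it's probably corrupted
--     if not has_indentation:
--         return False
--
--     # Check for basic Python structure indicators
--     has_def = any('def ' in line for line in lines)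
--     has_class = any('class ' in line for line in lines)
--     has_if = any('if ' in line for line in lines)
--     has_for = any('for ' in line for line in lines)
--     has_while = any('while ' in line for line in lines)
--
--     # If it has Python constructs, it should have indentation
--     if any([has_def, has_class, has_if, has_for, has_while]):
--         return has_indentation
--
--     return True
-- ===== SOURCE B (Python) =====
-- def _has_proper_indentation(code: str) -> bool:
--     # Streaming reformulation: peel one line at a time with str.partition and
--     # decide on the first indented non-blank line.  A's construct-detection
--     # phase is dead code (every path after its guard returns True), so no
--     # split() into a list and no staged has_def/has_class/... passes are needed.
--     rest = code
--     while True: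
--         head, sep, tail = rest.partition('\n')
--         if (head[:4] == '    ' or head[:1] == '\t') and head.strip():
--             return True
--         if not sep:
--             return False
--         rest = tail
-- ===== Notes on version B (the rewrite author's own statement) =====
-- stated objective: simpler
-- what changed: A's construct-detection phase (has_def/has_class/if/for/while scans over split lines) is dead code once the early guard passes, so B drops it and replaces split()+staged boolean passes by a streaming loop that peels one line at a time with str.partition and decides on the first indented non-blank line.
import Mathlib
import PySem

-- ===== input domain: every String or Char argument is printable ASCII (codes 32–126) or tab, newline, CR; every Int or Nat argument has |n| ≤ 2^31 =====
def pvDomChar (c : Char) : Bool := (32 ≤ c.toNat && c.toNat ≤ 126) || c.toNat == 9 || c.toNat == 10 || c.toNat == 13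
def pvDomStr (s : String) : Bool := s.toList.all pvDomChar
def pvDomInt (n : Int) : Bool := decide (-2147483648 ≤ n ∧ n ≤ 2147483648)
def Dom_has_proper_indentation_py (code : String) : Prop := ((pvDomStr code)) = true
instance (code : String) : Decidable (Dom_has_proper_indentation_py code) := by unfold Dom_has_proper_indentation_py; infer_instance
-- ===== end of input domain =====

-- B replaces A's staged scans by a recursive peel-one-line-and-recurse form (A's construct phase is dead code); return value only, no mutation.

-- ===== PORT A =====
-- the first 'for … break' loop of A, setting has_indentation
def pvIndentLoopA : List String → Bool
  | [] => false
  | line :: rest =>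
    if PySem.Str.strip line ≠ "" ∧
        (PySem.Str.startswith line "    " || PySem.Str.startswith line "\t") = true then
      true
    else
      pvIndentLoopA rest

def has_proper_indentation_py (code : String) : Bool :=
  let lines := (PySem.Chars.splitOn code.toList "\n".toList).map String.ofList
  let has_indentation := pvIndentLoopA lines
  if !has_indentation then
    false
  else
    let has_def := lines.any (fun l => PySem.Str.isIn "def " l)
    let has_class := lines.any (fun l => PySem.Str.isIn "class " l)
    let has_if := lines.any (fun l => PySem.Str.isIn "if " l)
    let has_for := lines.any (fun l => PySem.Str.isIn "for " l)
    let has_while := lines.any (fun l => PySem.Str.isIn "while " l)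
    if has_def || has_class || has_if || has_for || has_while then
      has_indentation
    else
      true

-- ===== PORT B =====
-- code.partition('\n'), hand-ported step for step on code points (exact:
-- (chars before the FIRST '\n', whether one was found, chars after it))
def pvPartitionNl : List Char → List Char × Bool × List Char
  | [] => ([], false, [])
  | c :: cs =>
    if c = '\n' then ([], true, cs)
    else
      let r := pvPartitionNl cs
      (c :: r.1, r.2.1, r.2.2)

-- termination fact the port's recursion cites: a found '\n' leaves a strictly shorter tail
theorem pvPartitionNl_tail_lt (cs : List Char) (h : (pvPartitionNl cs).2.1 = true) :
    (pvPartitionNl cs).2.2.length < cs.length := by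
  induction cs with
  | nil => simp [pvPartitionNl] at h
  | cons c rest ih =>
    by_cases hc : c = '\n'
    · simp [pvPartitionNl, hc]
    · simp only [pvPartitionNl, if_neg hc] at h ⊢
      exact Nat.lt_succ_of_lt (ih h)

def has_proper_indentation_py_alt_chars (cs : List Char) : Bool :=
  let p := pvPartitionNl cs
  if ((PySem.Chars.slice p.1 none (some 4) == "    ".toList) ||
      (PySem.Chars.slice p.1 none (some 1) == "\t".toList)) &&
     (PySem.Chars.strip p.1 != []) then
    true
  else
    -- the loop: 'if not sep: return False; rest = tail' continues as this recursion
    if hs : p.2.1 = true then has_proper_indentation_py_alt_chars p.2.2 else false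
termination_by cs.length
decreasing_by exact pvPartitionNl_tail_lt cs hs

def has_proper_indentation_py_alt (code : String) : Bool :=
  has_proper_indentation_py_alt_chars code.toList

-- ===== PRECONDITION & SPEC =====
def Spec_has_proper_indentation_py (code : String) (out : Bool) : Prop := out = has_proper_indentation_py_alt code
instance (code : String) (out : Bool) : Decidable (Spec_has_proper_indentation_py code out) := by unfold Spec_has_proper_indentation_py; infer_instance

-- ===== CLAIM (what is proved, stated in full; the proofs are below) =====
def Claim_equal_has_proper_indentation_py : Prop := ∀ (code : String), Dom_has_proper_indentation_py code → Spec_has_proper_indentation_py code (has_proper_indentation_py code)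

-- ===== LEMMAS AND PROOFS =====

-- naive recursive view of split('\n'), used only by the proofs
def pvSplitNl : List Char → List (List Char)
  | [] => [[]]
  | c :: rest =>
    if c = '\n' then [] :: pvSplitNl rest
    else (pvSplitNl rest).modifyHead (c :: ·)

theorem pvSplitNl_ne_nil (cs : List Char) : pvSplitNl cs ≠ [] := by
  cases cs with
  | nil => simp [pvSplitNl]
  | cons c rest =>
    by_cases hc : c = '\n' <;>
      simp [pvSplitNl, hc, List.modifyHead_eq_nil_iff, pvSplitNl_ne_nil rest]

theorem splitOn_go_nl (l : List Char) : ∀ (fuel : Nat) (cur : List Char) (acc : List (List Char)),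
    l.length < fuel →
    PySem.Chars.splitOn.go ['\n'] fuel l cur acc
      = acc.reverse ++ (pvSplitNl l).modifyHead (cur.reverse ++ ·) := by
  induction l with
  | nil =>
    intro fuel cur acc hf
    cases fuel with
    | zero => omega
    | succ f => simp [PySem.Chars.splitOn.go, pvSplitNl]
  | cons c rest ih =>
    intro fuel cur acc hf
    cases fuel with
    | zero => omega
    | succ f =>
      by_cases hc : c = '\n'
      · have hp : List.isPrefixOf ['\n'] (c :: rest) = true := by
          simp [List.isPrefixOf, hc]
        rw [PySem.Chars.splitOn.go, if_pos hp]
        have hd : List.drop (['\n'] : List Char).length (c :: rest) = rest := rfl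
        rw [hd, ih f [] (cur.reverse :: acc) (by simpa using Nat.lt_of_succ_lt_succ hf)]
        rcases hx : pvSplitNl rest with _ | ⟨h0, t0⟩
        · exact absurd hx (pvSplitNl_ne_nil rest)
        · simp [pvSplitNl, hc, hx, List.modifyHead]
      · have hp : List.isPrefixOf ['\n'] (c :: rest) = false := by
          simp only [List.isPrefixOf, Bool.and_true, beq_eq_false_iff_ne]
          exact fun h => hc h.symm
        rw [PySem.Chars.splitOn.go, if_neg (by simp [hp])]
        rw [ih f (c :: cur) acc (by simpa using Nat.lt_of_succ_lt_succ hf)]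
        have hne := pvSplitNl_ne_nil rest
        rcases hx : pvSplitNl rest with _ | ⟨h0, t0⟩
        · exact absurd hx hne
        · simp [pvSplitNl, hc, hx, List.modifyHead]

theorem splitOn_nl (cs : List Char) :
    PySem.Chars.splitOn cs ['\n'] = pvSplitNl cs := by
  unfold PySem.Chars.splitOn
  rw [splitOn_go_nl cs (cs.length + 1) [] [] (by omega)]
  rcases hx : pvSplitNl cs with _ | ⟨h0, t0⟩
  · exact absurd hx (pvSplitNl_ne_nil cs)
  · simp [List.modifyHead]

-- pvSplitNl seen through code.partition('\n')
theorem pvSplitNl_eq_partition (cs : List Char) :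
    pvSplitNl cs
      = (pvPartitionNl cs).1 ::
          (if (pvPartitionNl cs).2.1 = true then pvSplitNl (pvPartitionNl cs).2.2 else []) := by
  induction cs with
  | nil => simp [pvSplitNl, pvPartitionNl]
  | cons c rest ih =>
    by_cases hc : c = '\n'
    · simp [pvSplitNl, pvPartitionNl, hc]
    · simp only [pvSplitNl, pvPartitionNl, if_neg hc]
      rw [ih]
      simp [List.modifyHead]

-- A's per-line predicate (from the break-loop)
def pvPredA (line : String) : Bool :=
  PySem.Str.strip line != "" &&
    (PySem.Str.startswith line "    " || PySem.Str.startswith line "\t")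

-- A's break-loop computes List.any of pvPredA
theorem pvIndentLoopA_eq_any (lines : List String) :
    pvIndentLoopA lines = lines.any pvPredA := by
  induction lines with
  | nil => rfl
  | cons l rest ih =>
    simp only [pvIndentLoopA, List.any_cons, ← ih]
    by_cases h : PySem.Str.strip l ≠ "" ∧
        (PySem.Str.startswith l "    " || PySem.Str.startswith l "\t") = true
    · rw [if_pos h]
      have h2 := h.2
      simp only [Bool.or_eq_true, PySem.Str.startswith_eq] at h2
      simp [pvPredA, bne_iff_ne, h.1]
      tauto
    · rw [if_neg h]
      rcases Decidable.not_and_iff_or_not.mp h with h1 | h2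
      · simp at h1; simp [pvPredA, h1]
      · simp at h2; simp [pvPredA, h2]

-- a length-n initial slice equals p iff the line starts with p
theorem pvTake_eq_startswith (p l : List Char) :
    (l.take p.length == p) = PySem.Chars.startswith l p := by
  by_cases h : p <+: l
  · have ht := List.prefix_iff_eq_take.mp h
    simp [(PySem.Chars.startswith_iff l p).mpr h, ← ht]
  · have hb : PySem.Chars.startswith l p = false := by
      rcases hx : PySem.Chars.startswith l p with _ | _
      · rfl
      · exact absurd ((PySem.Chars.startswith_iff l p).mp hx) h
    rw [hb, beq_eq_false_iff_ne]
    intro he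
    exact h (List.prefix_iff_eq_take.mpr he.symm)

-- B's per-line slice tests agree with A's startswith/strip tests
theorem pvPredB_eq_predA (l : List Char) :
    (((PySem.Chars.slice l none (some 4) == "    ".toList) ||
        (PySem.Chars.slice l none (some 1) == "\t".toList)) &&
       (PySem.Chars.strip l != []))
      = pvPredA (String.ofList l) := by
  have h4 : (PySem.Chars.slice l none (some 4) == "    ".toList)
      = PySem.Chars.startswith l "    ".toList := by
    have hs : PySem.Chars.slice l none (some 4) = l.take 4 := by
      simp [pysem]
    rw [hs, show (4 : Nat) = ("    ".toList).length from rfl, pvTake_eq_startswith]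
  have h1 : (PySem.Chars.slice l none (some 1) == "\t".toList)
      = PySem.Chars.startswith l "\t".toList := by
    have hs : PySem.Chars.slice l none (some 1) = l.take 1 := by
      simp [pysem]
    rw [hs, show (1 : Nat) = ("\t".toList).length from rfl, pvTake_eq_startswith]
  have hstrip : (PySem.Str.strip (String.ofList l) != "") = (PySem.Chars.strip l != []) := by
    rw [Bool.eq_iff_iff]
    simp only [bne_iff_ne, ne_eq]
    rw [not_iff_not]
    constructor
    · intro h
      have := congrArg String.toList h
      simpa using this
    · intro h
      rw [← String.toList_inj]
      simpa using h
  simp only [pvPredA, h4, h1, hstrip]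
  simp [Bool.and_comm]

-- B's recursion computes List.any of pvPredA over the '\n'-split pieces
theorem pvAlt_eq_any (cs : List Char) :
    has_proper_indentation_py_alt_chars cs
      = (pvSplitNl cs).any (fun l => pvPredA (String.ofList l)) := by
  rw [has_proper_indentation_py_alt_chars]
  rw [pvSplitNl_eq_partition cs]
  rw [pvPredB_eq_predA]
  by_cases hp : pvPredA (String.ofList (pvPartitionNl cs).1) = true
  · simp [hp]
  · simp only [Bool.not_eq_true] at hp
    rw [if_neg (by simp [hp])]
    by_cases hs : (pvPartitionNl cs).2.1 = true
    · rw [dif_pos hs, if_pos hs]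
      rw [pvAlt_eq_any (pvPartitionNl cs).2.2]
      simp [hp]
    · rw [dif_neg hs, if_neg hs]
      simp [hp]
  termination_by cs.length
  decreasing_by exact pvPartitionNl_tail_lt cs hs

-- ===== VERDICT (by name: the statement is the Claim_ definition above) =====
theorem has_proper_indentation_py_spec : Claim_equal_has_proper_indentation_py := by
  intro code _
  unfold Spec_has_proper_indentation_py has_proper_indentation_py has_proper_indentation_py_alt
  rw [pvAlt_eq_any, ← splitOn_nl]
  simp only [pvIndentLoopA_eq_any, List.any_map, Function.comp_def,
    show ("\n".toList : List Char) = ['\n'] from rfl]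
  cases h : (PySem.Chars.splitOn code.toList ['\n']).any (fun l => pvPredA (String.ofList l)) <;>
    simp [h]
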